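-- pv_equiv track=rewrite | github.com/rawnkelly/polycalc | python/polycore/cli.py | _parse_tickers_arg
-- ===== SOURCE A (Python) =====
-- def _parse_tickers_arg(value: str) -> list[str]:
--     seen: set[str] = set()
--     tickers: list[str] = []
--     for raw in value.split(','):
--         ticker = raw.strip().upper()
--         if ticker and ticker not in seen:
--             tickers.append(ticker)
--             seen.add(ticker)
--     return tickers
-- ===== SOURCE B (Python) =====
-- def _parse_tickers_arg(value: str) -> list[str]:
--     def go(raws: list[str]) -> list[str]:
--         if not raws:
--             return []
--         t = raws[0].strip().upper()
--         rest = [r for r in raws[1:] if r.strip().upper() != t]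
--         return ([t] if t else []) + go(rest)
--     return go(value.split(','))
-- ===== Notes on version B (the rewrite author's own statement) =====
-- stated objective: alternative
-- what changed: Replaced the single fused loop with an explicit seen-set by a head recursion that emits the first token's cleaned form and filters every later token with the same cleaned form out of the tail before recursing, so no membership structure is maintained at all.
import Mathlib
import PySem

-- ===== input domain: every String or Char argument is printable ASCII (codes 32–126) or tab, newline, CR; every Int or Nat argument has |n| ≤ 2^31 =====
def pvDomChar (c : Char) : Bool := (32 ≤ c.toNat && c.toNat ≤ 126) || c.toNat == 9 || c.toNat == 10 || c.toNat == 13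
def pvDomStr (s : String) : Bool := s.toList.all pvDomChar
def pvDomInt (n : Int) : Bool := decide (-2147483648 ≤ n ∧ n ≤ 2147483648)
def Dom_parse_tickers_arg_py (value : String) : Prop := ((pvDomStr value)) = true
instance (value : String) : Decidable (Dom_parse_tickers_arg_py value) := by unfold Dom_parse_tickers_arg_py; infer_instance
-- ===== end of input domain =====

-- B replaces A's fused seen-set loop by a head recursion that filters later duplicates
-- out of the tail before recursing (alternative decomposition; no membership structure kept).

-- ===== PORT A =====
-- fused loop: state is (seen set, output list)
def parse_tickers_arg_py (value : String) : List String :=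
  (((PySem.Str.split? value ",").getD []).foldl
    (fun (st : PySem.Set String × List String) raw =>
      let ticker := PySem.Str.upper (PySem.Str.strip raw)
      if ticker ≠ "" ∧ ¬ PySem.Set.contains st.1 ticker = true then
        (PySem.Set.add st.1 ticker, st.2 ++ [ticker])
      else st)
    (PySem.Set.empty, [])).2

-- ===== PORT B =====
-- go: emit the head's cleaned form, drop all later raws with the same cleaned form, recurse on the rest
def pvGo : List String → List String
  | [] => []
  | r :: rs =>
    let t := PySem.Str.upper (PySem.Str.strip r)
    let rest := rs.filter (fun x => PySem.Str.upper (PySem.Str.strip x) ≠ t)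
    (if t ≠ "" then [t] else []) ++ pvGo rest
termination_by l => l.length
decreasing_by
  simp only [List.length_unattach]
  exact Nat.lt_succ_of_le (le_trans (List.length_filter_le _ _) (by simp))

def parse_tickers_arg_py_alt (value : String) : List String :=
  pvGo ((PySem.Str.split? value ",").getD [])

-- ===== PRECONDITION & SPEC =====
def Spec_parse_tickers_arg_py (value : String) (out : List String) : Prop := out = parse_tickers_arg_py_alt value
instance (value : String) (out : List String) : Decidable (Spec_parse_tickers_arg_py value out) := by unfold Spec_parse_tickers_arg_py; infer_instance

-- ===== CLAIM =====
def Claim_equal_parse_tickers_arg_py : Prop := ∀ (value : String), Dom_parse_tickers_arg_py value → Spec_parse_tickers_arg_py value (parse_tickers_arg_py value)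

-- ===== LEMMAS AND PROOFS =====

def pvClean (r : String) : String := PySem.Str.upper (PySem.Str.strip r)

def pvDedup : List String → List String
  | [] => []
  | t :: ts => t :: pvDedup (ts.filter (fun x => x ≠ t))
termination_by l => l.length
decreasing_by
  simp only [List.length_unattach]
  exact Nat.lt_succ_of_le (le_trans (List.length_filter_le _ _) (by simp))

theorem pvDedup_nil : pvDedup [] = [] := by rw [pvDedup.eq_def]
theorem pvDedup_cons (t : String) (ts : List String) :
    pvDedup (t :: ts) = t :: pvDedup (ts.filter (fun x => x ≠ t)) := by rw [pvDedup.eq_def]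

theorem pvDedup_congr (xs ys : List String) (h : xs = ys) : pvDedup xs = pvDedup ys := h ▸ rfl


theorem pvStep (l : List String) (r : String) :
    (let ticker := PySem.Str.upper (PySem.Str.strip r);
     if ticker ≠ "" ∧ ¬ PySem.Set.contains ((l, l) : PySem.Set String × List String).1 ticker = true then
       (PySem.Set.add ((l, l) : PySem.Set String × List String).1 ticker,
        ((l, l) : PySem.Set String × List String).2 ++ [ticker])
     else ((l, l) : PySem.Set String × List String))
    = (if pvClean r ≠ "" ∧ pvClean r ∉ l then (l ++ [pvClean r], l ++ [pvClean r]) else (l, l)) := by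
  show (if PySem.Str.upper (PySem.Str.strip r) ≠ "" ∧
      ¬ PySem.Set.contains l (PySem.Str.upper (PySem.Str.strip r)) = true then
      (PySem.Set.add l (PySem.Str.upper (PySem.Str.strip r)),
       l ++ [PySem.Str.upper (PySem.Str.strip r)]) else (l, l)) = _
  by_cases h : pvClean r ≠ "" ∧ pvClean r ∉ l
  · rw [if_pos h, if_pos ⟨h.1, by simpa [PySem.Set.contains_iff] using h.2⟩,
      show PySem.Set.add l (PySem.Str.upper (PySem.Str.strip r)) = l ++ [pvClean r] from
        PySem.Set.add_of_not_mem h.2]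
    rfl
  · rw [if_neg h, if_neg (by intro hand; exact h ⟨hand.1, by
      simpa [PySem.Set.contains_iff] using hand.2⟩)]


theorem pv_loop (rs : List String) (l : List String) :
    ((rs.foldl
      (fun (st : PySem.Set String × List String) raw =>
        let ticker := PySem.Str.upper (PySem.Str.strip raw)
        if ticker ≠ "" ∧ ¬ PySem.Set.contains st.1 ticker = true then
          (PySem.Set.add st.1 ticker, st.2 ++ [ticker])
        else st)
      (l, l)).2)
    = l ++ pvDedup (((rs.map pvClean).filter (fun t => t ≠ "")).filter (fun t => !(l.contains t))) := by
  induction rs generalizing l with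
  | nil => simp [pvDedup_nil]
  | cons r rs ih =>
    rw [List.foldl_cons, pvStep l r]
    by_cases h0 : pvClean r = ""
    · rw [if_neg (by simp [h0]), ih l]
      exact congrArg (l ++ ·) (pvDedup_congr _ _ (by simp [h0]))
    · by_cases hc : pvClean r ∈ l
      · rw [if_neg (by simp [hc]), ih l]
        refine congrArg (l ++ ·) (pvDedup_congr _ _ ?_)
        simp only [List.map_cons, List.filter_cons]
        rw [if_pos (by simpa using h0), List.filter_cons]
        simp [hc]
      · rw [if_pos ⟨h0, hc⟩, ih (l ++ [pvClean r])]
        rw [List.append_assoc, List.singleton_append]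
        refine congrArg (l ++ ·) ?_
        have hr : ((((r :: rs).map pvClean).filter (fun t => t ≠ "")).filter (fun t => !(l.contains t)))
            = pvClean r :: ((((rs.map pvClean).filter (fun t => t ≠ "")).filter (fun t => !(l.contains t)))) := by
          simp only [List.map_cons, List.filter_cons]
          rw [if_pos (by simpa using h0), List.filter_cons]
          rw [if_pos (by simp [hc])]
        rw [hr, pvDedup_cons]
        refine congrArg (pvClean r :: ·) (pvDedup_congr _ _ ?_)
        rw [List.filter_filter, List.filter_filter, List.filter_filter]
        apply List.filter_congr
        intro x _
        by_cases hx : x = pvClean r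
        · simp [hx, hc]
        · simp [hx]


theorem pvGo_nil : pvGo [] = [] := by rw [pvGo.eq_def]
theorem pvGo_cons (r : String) (rs : List String) : pvGo (r :: rs) =
    (if pvClean r ≠ "" then [pvClean r] else []) ++
      pvGo (rs.filter fun x => pvClean x ≠ pvClean r) := by
  rw [pvGo.eq_def]; rfl

theorem pvGo_eq_pvDedup (n : Nat) (rs : List String) (hn : rs.length ≤ n) :
    pvGo rs = pvDedup ((rs.map pvClean).filter (fun t => t ≠ "")) := by
  induction n generalizing rs with
  | zero =>
    have h : rs = [] := List.eq_nil_of_length_eq_zero (Nat.le_zero.mp hn)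
    subst h
    rw [pvGo_nil]
    exact (pvDedup_nil).symm
  | succ n ih =>
    cases rs with
    | nil => rw [pvGo_nil]; exact (pvDedup_nil).symm
    | cons r rs =>
      rw [pvGo_cons, ih _ (le_trans (List.length_filter_le _ _) (Nat.le_of_succ_le_succ hn))]
      by_cases h : pvClean r = ""
      · rw [if_neg (by simp [h]), List.nil_append]
        refine pvDedup_congr _ _ ?_
        simp only [List.filter_map, List.filter_filter, List.filter_cons, Function.comp,
          h, ne_eq, not_true_eq_false, decide_false, Bool.false_eq_true, if_false]
        refine congrArg _ (List.filter_congr ?_)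
        intro x _
        by_cases hx : pvClean x = "" <;> simp [hx]
      · rw [if_pos (by simpa using h), List.singleton_append]
        rw [show (((r :: rs).map pvClean).filter (fun t => t ≠ "")) =
          pvClean r :: ((rs.map pvClean).filter (fun t => t ≠ "")) from by
            rw [List.map_cons, List.filter_cons, if_pos (by simpa using h)]]
        rw [pvDedup_cons]
        refine congrArg (pvClean r :: ·) (pvDedup_congr _ _ ?_)
        simp only [List.filter_map, List.filter_filter, Function.comp]
        refine congrArg _ (List.filter_congr ?_)
        intro x _
        by_cases hx : pvClean x = pvClean r
        · simp [hx, h]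
        · by_cases hx0 : pvClean x = "" <;> simp [hx, hx0]


-- ===== VERDICT =====
theorem parse_tickers_arg_py_spec : Claim_equal_parse_tickers_arg_py := by
  intro value _
  show parse_tickers_arg_py value = parse_tickers_arg_py_alt value
  unfold parse_tickers_arg_py parse_tickers_arg_py_alt
  rw [show (PySem.Set.empty : PySem.Set String) = ([] : List String) from rfl]
  rw [pv_loop, pvGo_eq_pvDedup ((PySem.Str.split? value ",").getD []).length _ le_rfl,
    List.nil_append]
  exact pvDedup_congr _ _ (by simp)
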